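-- pv_equiv track=rewrite | github.com/konveyor/MLAssist | examples/rule-expert/utils.py | _parse_list_output
-- ===== SOURCE A (Python) =====
-- def _parse_list_output(o: str) -> list[str]:
--     """
--     Parses LLM output that is a list of items in the YAML format
--     """
--     parsed_lines = []
--     for line in o.split("\n"):
--         if line.startswith("-"):
--             parsed_lines.append(line)
--         elif len(parsed_lines) > 0:
--             parsed_lines[-1] = "\n".join([parsed_lines[-1], line])
--     return parsed_lines
-- ===== SOURCE B (Python) =====
-- def _parse_list_output(o: str) -> list[str]:
--     """Recursive-descent chunking: drop lines before the first "-" line, then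
--     repeatedly take one "-" line together with its continuation lines."""
--
--     def span_nondash(lines):
--         i = 0
--         while i < len(lines) and not lines[i].startswith("-"):
--             i += 1
--         return lines[:i], lines[i:]
--
--     def chunks(lines):
--         if not lines:
--             return []
--         body, rest = span_nondash(lines[1:])
--         return ["\n".join([lines[0]] + body)] + chunks(rest)
--
--     _, items = span_nondash(o.split("\n"))
--     return chunks(items)
-- ===== Notes on version B (the rewrite author's own statement) =====
-- stated objective: alternative
-- what changed: B replaces A's single fold that repeatedly re-joins the mutable last item with a two-phase recursive descent: skip the prefix of non-dash lines, then split the rest into chunks (one dash line plus its continuation lines) and join each chunk once.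
import Mathlib
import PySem

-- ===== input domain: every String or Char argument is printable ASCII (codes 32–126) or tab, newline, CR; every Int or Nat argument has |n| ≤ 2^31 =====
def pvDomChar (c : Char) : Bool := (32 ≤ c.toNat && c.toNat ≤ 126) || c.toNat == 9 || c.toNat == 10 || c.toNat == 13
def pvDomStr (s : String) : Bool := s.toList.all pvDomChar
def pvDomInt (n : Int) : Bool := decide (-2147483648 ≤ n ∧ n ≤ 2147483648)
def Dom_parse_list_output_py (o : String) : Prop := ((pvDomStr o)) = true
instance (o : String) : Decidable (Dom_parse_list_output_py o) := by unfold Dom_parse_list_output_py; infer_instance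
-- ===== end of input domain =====

-- B replaces A's fold that repeatedly re-joins the mutable last item with a recursive
-- descent: drop the non-dash prefix, then chunk (dash line + continuations) and join each chunk once.


-- ===== PORT A =====
-- A: fold over the lines; a dash line starts a new item, any other line is appended
-- (via a fresh two-element join) onto the last item if one exists.
def pvStepA (acc : List String) (line : String) : List String :=
  if PySem.Str.startswith line "-" then acc ++ [line]
  else if acc.length > 0 then acc.dropLast ++ [PySem.Str.join "\n" [acc.getLast!, line]]
  else acc

def parse_list_output_py (o : String) : List String :=
  ((PySem.Str.split? o "\n").getD []).foldl pvStepA []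

-- ===== PORT B =====
-- span_nondash: the longest prefix of lines not starting with "-", and the rest
def pvSpanND : List String → List String × List String
  | [] => ([], [])
  | l :: ls =>
    if PySem.Str.startswith l "-" then ([], l :: ls)
    else ((l :: (pvSpanND ls).1), (pvSpanND ls).2)

theorem pvSpanND_snd_len_le : ∀ ls : List String, (pvSpanND ls).2.length ≤ ls.length := by
  intro ls
  induction ls with
  | nil => simp [pvSpanND]
  | cons l ls ih =>
    simp only [pvSpanND]
    split
    · simp
    · simpa using Nat.le_succ_of_le ih

-- chunks: one dash line plus its continuation lines, each chunk joined once
def pvChunks : List String → List String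
  | [] => []
  | l :: ls =>
    PySem.Str.join "\n" (l :: (pvSpanND ls).1) :: pvChunks (pvSpanND ls).2
termination_by ls => ls.length
decreasing_by simpa using Nat.lt_succ_of_le (pvSpanND_snd_len_le ls)

def parse_list_output_py_alt (o : String) : List String :=
  pvChunks (pvSpanND ((PySem.Str.split? o "\n").getD [])).2

-- ===== PRECONDITION & SPEC =====
def Spec_parse_list_output_py (o : String) (out : List String) : Prop := out = parse_list_output_py_alt o
instance (o : String) (out : List String) : Decidable (Spec_parse_list_output_py o out) := by unfold Spec_parse_list_output_py; infer_instance

-- ===== CLAIM (what is proved, stated in full; the proofs are below) =====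
def Claim_equal_parse_list_output_py : Prop := ∀ (o : String), Dom_parse_list_output_py o → Spec_parse_list_output_py o (parse_list_output_py o)

-- ===== LEMMAS AND PROOFS =====

theorem pv_join_one (x : String) : PySem.Str.join "\n" [x] = x := by
  apply String.toList_injective
  simp [PySem.Chars.join_singleton]

theorem pv_join_cons_cons (x l : String) (rest : List String) :
    PySem.Str.join "\n" (x :: l :: rest) =
    PySem.Str.join "\n" (PySem.Str.join "\n" [x, l] :: rest) := by
  apply String.toList_injective
  cases rest with
  | nil => simp [PySem.Chars.join_cons_cons, PySem.Chars.join_singleton]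
  | cons r rs => simp [PySem.Chars.join_cons_cons, List.append_assoc]

-- unfolding equations stated once, since pvChunks/pvSpanND are recursive
theorem pvChunks_nil : pvChunks [] = [] := by simp [pvChunks]

theorem pvChunks_cons (x : String) (ls : List String) :
    pvChunks (x :: ls) =
    PySem.Str.join "\n" (x :: (pvSpanND ls).1) :: pvChunks (pvSpanND ls).2 := by
  rw [pvChunks]

theorem pvSpanND_cons_pos (l : String) (ls : List String)
    (h : PySem.Chars.startswith l.toList ['-'] = true) :
    pvSpanND (l :: ls) = ([], l :: ls) := by
  simp [pvSpanND, h]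

theorem pvSpanND_cons_neg (l : String) (ls : List String)
    (h : ¬ PySem.Chars.startswith l.toList ['-'] = true) :
    pvSpanND (l :: ls) = (l :: (pvSpanND ls).1, (pvSpanND ls).2) := by
  simp [pvSpanND, h]

-- the fold from a nonempty accumulator produces acc followed by the chunks of x :: ls
theorem pv_foldl_chunks : ∀ (ls : List String) (acc : List String) (x : String),
    (ls.foldl pvStepA (acc ++ [x])) = acc ++ pvChunks (x :: ls) := by
  intro ls
  induction ls with
  | nil =>
    intro acc x
    simp [pvChunks_cons, pvChunks_nil, pvSpanND, pv_join_one]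
  | cons l ls ih =>
    intro acc x
    by_cases h : PySem.Chars.startswith l.toList ['-'] = true
    · have hstep : pvStepA (acc ++ [x]) l = (acc ++ [x]) ++ [l] := by
        simp [pvStepA, h]
      rw [List.foldl_cons, hstep, ih (acc ++ [x]) l,
          pvChunks_cons x (l :: ls), pvSpanND_cons_pos l ls h]
      simp [pv_join_one]
    · have hstep : pvStepA (acc ++ [x]) l = acc ++ [PySem.Str.join "\n" [x, l]] := by
        simp [pvStepA, h]
      rw [List.foldl_cons, hstep, ih acc (PySem.Str.join "\n" [x, l])]
      congr 1
      rw [pvChunks_cons, pvChunks_cons x (l :: ls), pvSpanND_cons_neg l ls h]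
      conv_rhs => rw [pv_join_cons_cons]

-- skipping the leading non-dash lines does not change A's fold from []
theorem pv_foldl_drop : ∀ ls : List String,
    ls.foldl pvStepA [] = (pvSpanND ls).2.foldl pvStepA [] := by
  intro ls
  induction ls with
  | nil => rfl
  | cons l ls ih =>
    by_cases h : PySem.Chars.startswith l.toList ['-'] = true
    · rw [pvSpanND_cons_pos l ls h]
    · have hstep : pvStepA [] l = [] := by simp [pvStepA, h]
      rw [pvSpanND_cons_neg l ls h, List.foldl_cons, hstep]
      exact ih

-- the rest returned by pvSpanND is empty or headed by a dash line
theorem pvSpanND_snd_head : ∀ (ls : List String) (x : String) (rest : List String),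
    (pvSpanND ls).2 = x :: rest → PySem.Chars.startswith x.toList ['-'] = true := by
  intro ls
  induction ls with
  | nil => intro x rest h; simp [pvSpanND] at h
  | cons l ls ih =>
    intro x rest h
    by_cases hl : PySem.Chars.startswith l.toList ['-'] = true
    · rw [pvSpanND_cons_pos l ls hl] at h
      simp at h
      rw [← h.1]; exact hl
    · rw [pvSpanND_cons_neg l ls hl] at h
      exact ih x rest h

theorem pv_main (ls : List String) :
    ls.foldl pvStepA [] = pvChunks (pvSpanND ls).2 := by
  rw [pv_foldl_drop]
  cases hs : (pvSpanND ls).2 with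
  | nil => rw [pvChunks_nil]; rfl
  | cons x rest =>
    have hx := pvSpanND_snd_head ls x rest hs
    have hstep : pvStepA [] x = [] ++ [x] := by simp [pvStepA, hx]
    rw [List.foldl_cons, hstep, pv_foldl_chunks rest [] x]
    simp

-- ===== VERDICT (by name: the statement is the Claim_ definition above) =====
theorem parse_list_output_py_spec : Claim_equal_parse_list_output_py := by
  intro o _
  unfold Spec_parse_list_output_py parse_list_output_py parse_list_output_py_alt
  exact pv_main _
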